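-- pv_equiv track=rewrite | github.com/sieczkah/Codewars_KATA | 6 kyu/Street Fighter 2 - Character Selection.py | street_fighter_selection
-- ===== SOURCE A (Python) =====
-- dir_x = {'right': 1, 'left': -1}
--
-- dir_y = {'up': 0, 'down': 1}
--
-- def street_fighter_selection(fighters, initial_position, moves):
--     x, y = initial_position
--     char = []
--     for i in moves:
--         if i in dir_x.keys():
--             x += dir_x[i]
--         else:
--             y = dir_y[i]
--         char.append(fighters[y][x % 6])
--     return char
-- ===== SOURCE B (Python) =====
-- def street_fighter_selection(fighters, initial_position, moves):
--     x0, y0 = initial_position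
--     # pass 1: horizontal deltas, then x trajectory as running sums
--     deltas = [1 if m == 'right' else -1 if m == 'left' else 0 for m in moves]
--     xs = []
--     acc = x0
--     for d in deltas:
--         acc += d
--         xs.append(acc)
--     # pass 2: y trajectory by forward-filling the row (absolute set on up/down)
--     ys = []
--     cur = y0
--     for m in moves:
--         cur = 0 if m == 'up' else 1 if m == 'down' else cur
--         ys.append(cur)
--     # pass 3: character lookup along the trajectory
--     return [fighters[y][x % 6] for x, y in zip(xs, ys)]
-- ===== Notes on version B (the rewrite author's own statement) =====
-- stated objective: alternative
-- what changed: B replaces A's single interleaved cursor simulation with three separate table-building passes: the x trajectory as running sums of horizontal deltas, the y trajectory by forward-filling row sets, and a final zip comprehension doing the grid lookups.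
import Mathlib
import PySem

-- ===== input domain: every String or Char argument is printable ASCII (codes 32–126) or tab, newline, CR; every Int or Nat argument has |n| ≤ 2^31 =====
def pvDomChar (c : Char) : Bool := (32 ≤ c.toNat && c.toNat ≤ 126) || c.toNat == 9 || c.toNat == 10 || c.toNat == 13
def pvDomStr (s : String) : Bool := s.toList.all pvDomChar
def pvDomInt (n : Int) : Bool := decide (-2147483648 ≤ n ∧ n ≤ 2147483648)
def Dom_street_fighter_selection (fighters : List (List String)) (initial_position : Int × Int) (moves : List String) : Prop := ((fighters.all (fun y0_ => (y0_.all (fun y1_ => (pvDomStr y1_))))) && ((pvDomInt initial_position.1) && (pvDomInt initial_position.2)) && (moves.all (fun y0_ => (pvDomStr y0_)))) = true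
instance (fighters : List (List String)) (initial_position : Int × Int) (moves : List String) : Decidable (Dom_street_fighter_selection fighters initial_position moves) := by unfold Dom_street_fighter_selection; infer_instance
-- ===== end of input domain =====

-- B rebuilds the answer from three separate passes (x trajectory as running sums of deltas,
-- y trajectory by forward-fill, then one lookup pass) instead of A's single interleaved simulation;
-- objective: alternative decomposition, same cost.

-- ===== PORT A =====
def pvDirX : PySem.Dict String Int := PySem.Dict.mk [("right", 1), ("left", -1)]
def pvDirY : PySem.Dict String Int := PySem.Dict.mk [("up", 0), ("down", 1)]

-- fighters[y][x % 6]  (pyGet? = Python indexing; the .getD defaults are never reached inside Pre_)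
def pvLook (fighters : List (List String)) (y x : Int) : String :=
  (PySem.List.pyGet? ((PySem.List.pyGet? fighters y).getD []) (PySem.Int.mod x 6)).getD ""

def street_fighter_selection (fighters : List (List String)) (initial_position : Int × Int) (moves : List String) : List String :=
  (moves.foldl
    (fun (st : Int × Int × List String) i =>
      let p : Int × Int :=
        match pvDirX.get? i with
        | some d => (st.1 + d, st.2.1)             -- x += dir_x[i]
        | none   => (st.1, (pvDirY.get? i).getD st.2.1)  -- y = dir_y[i] (KeyError outside Pre_)
      (p.1, p.2, st.2.2 ++ [pvLook fighters p.2 p.1]))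
    (initial_position.1, initial_position.2, [])).2.2

-- ===== PORT B =====
def pvDeltas (moves : List String) : List Int :=
  moves.map (fun m => if m = "right" then 1 else if m = "left" then -1 else 0)

def pvXs (x0 : Int) (ds : List Int) : List Int :=
  (ds.foldl (fun (st : Int × List Int) d => (st.1 + d, st.2 ++ [st.1 + d])) (x0, [])).2

def pvYs (y0 : Int) (moves : List String) : List Int :=
  (moves.foldl (fun (st : Int × List Int) m =>
      let c := if m = "up" then 0 else if m = "down" then 1 else st.1
      (c, st.2 ++ [c])) (y0, [])).2

def street_fighter_selection_alt (fighters : List (List String)) (initial_position : Int × Int) (moves : List String) : List String :=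
  ((pvXs initial_position.1 (pvDeltas moves)).zip (pvYs initial_position.2 moves)).map
    (fun p => pvLook fighters p.2 p.1)

-- ===== PRECONDITION & SPEC =====
-- row index in effect after the prefix `pre` of moves: the last vertical move sets it, else y0
def pvRowAt (y0 : Int) (pre : List String) : Int :=
  match (pre.filter (fun m => m == "up" || m == "down")).getLast? with
  | none => y0
  | some m => if m = "up" then 0 else 1

-- column index after the prefix `pre`: net horizontal displacement, mod 6 (Python %, so in [0,6))
def pvColAt (x0 : Int) (pre : List String) : Int :=
  PySem.Int.mod (x0 + pre.count "right" - pre.count "left") 6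

-- Pre_ excludes exactly the inputs where Python A raises: a move outside the four directions
-- (KeyError), or a step whose row/column access leaves the grid (IndexError).
def Pre_street_fighter_selection (fighters : List (List String)) (initial_position : Int × Int) (moves : List String) : Prop :=
  ∀ k ∈ List.range moves.length,
    (moves.getD k "" = "left" ∨ moves.getD k "" = "right" ∨
     moves.getD k "" = "up" ∨ moves.getD k "" = "down") ∧
    PySem.Raise.InRange fighters.length (pvRowAt initial_position.2 (moves.take (k + 1))) ∧
    pvColAt initial_position.1 (moves.take (k + 1)) <
      ((PySem.List.pyGet? fighters (pvRowAt initial_position.2 (moves.take (k + 1)))).getD []).length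
instance (fighters : List (List String)) (initial_position : Int × Int) (moves : List String) : Decidable (Pre_street_fighter_selection fighters initial_position moves) := by unfold Pre_street_fighter_selection; infer_instance

def pvWitness_street_fighter_selection : List (List String) × (Int × Int) × List String :=
  ([["a", "b", "c", "d", "e", "f"], ["g", "h", "i", "j", "k", "l"]], (0, 0),
   ["right", "down", "left", "up"])

def Spec_street_fighter_selection (fighters : List (List String)) (initial_position : Int × Int) (moves : List String) (out : List String) : Prop := out = street_fighter_selection_alt fighters initial_position moves
instance (fighters : List (List String)) (initial_position : Int × Int) (moves : List String) (out : List String) : Decidable (Spec_street_fighter_selection fighters initial_position moves out) := by unfold Spec_street_fighter_selection; infer_instance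

-- ===== CLAIM (what is proved, stated in full; the proofs are below) =====
def Claim_equal_street_fighter_selection : Prop := ∀ (fighters : List (List String)) (initial_position : Int × Int) (moves : List String), Dom_street_fighter_selection fighters initial_position moves → Pre_street_fighter_selection fighters initial_position moves → Spec_street_fighter_selection fighters initial_position moves (street_fighter_selection fighters initial_position moves)

-- ===== LEMMAS AND PROOFS =====

-- direct-recursion views of B's two accumulator loops
def pvXsRec : Int → List Int → List Int
  | _, [] => []
  | x, d :: ds => (x + d) :: pvXsRec (x + d) ds

def pvYsRec : Int → List String → List Int
  | _, [] => []
  | y, m :: ms =>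
    let c := if m = "up" then 0 else if m = "down" then 1 else y
    c :: pvYsRec c ms

theorem pvXs_eq_rec (ds : List Int) : ∀ (x : Int) (l : List Int),
    (ds.foldl (fun (st : Int × List Int) d => (st.1 + d, st.2 ++ [st.1 + d])) (x, l)).2
      = l ++ pvXsRec x ds := by
  induction ds with
  | nil => intro x l; simp [pvXsRec]
  | cons d ds ih => intro x l; simp [List.foldl, pvXsRec, ih]

theorem pvYs_eq_rec (ms : List String) : ∀ (y : Int) (l : List Int),
    (ms.foldl (fun (st : Int × List Int) m =>
        let c := if m = "up" then 0 else if m = "down" then 1 else st.1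
        (c, st.2 ++ [c])) (y, l)).2
      = l ++ pvYsRec y ms := by
  induction ms with
  | nil => intro y l; simp [pvYsRec]
  | cons m ms ih => intro m l; simp [List.foldl, pvYsRec, ih]

theorem pvDirX_get (m : String) :
    pvDirX.get? m = if m = "right" then some 1 else if m = "left" then some (-1) else none := by
  by_cases h1 : m = "right"
  · subst h1; decide
  · by_cases h2 : m = "left"
    · subst h2; decide
    · rw [if_neg h1, if_neg h2]
      simp [pvDirX, PySem.Dict.get?, List.find?,
        beq_eq_false_iff_ne.mpr (Ne.symm h1), beq_eq_false_iff_ne.mpr (Ne.symm h2)]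

theorem pvDirY_get (m : String) :
    pvDirY.get? m = if m = "up" then some 0 else if m = "down" then some 1 else none := by
  by_cases h1 : m = "up"
  · subst h1; decide
  · by_cases h2 : m = "down"
    · subst h2; decide
    · rw [if_neg h1, if_neg h2]
      simp [pvDirY, PySem.Dict.get?, List.find?,
        beq_eq_false_iff_ne.mpr (Ne.symm h1), beq_eq_false_iff_ne.mpr (Ne.symm h2)]

-- A's one step of cursor update equals B's (delta, forward-fill) pair, for every string m
theorem pvStep_eq (x y : Int) (m : String) :
    (match pvDirX.get? m with
     | some d => (x + d, y)
     | none   => (x, (pvDirY.get? m).getD y))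
    = ((x + (if m = "right" then 1 else if m = "left" then -1 else 0)),
       (if m = "up" then 0 else if m = "down" then 1 else y)) := by
  by_cases h1 : m = "right" <;> by_cases h2 : m = "left" <;>
    by_cases h3 : m = "up" <;> by_cases h4 : m = "down" <;>
    simp_all [pvDirX_get, pvDirY_get]

theorem pvMain (fighters : List (List String)) (ms : List String) : ∀ (x y : Int) (cs : List String),
    (ms.foldl
      (fun (st : Int × Int × List String) i =>
        (st.1 + (if i = "right" then 1 else if i = "left" then -1 else 0),
         (if i = "up" then 0 else if i = "down" then 1 else st.2.1),
         st.2.2 ++ [pvLook fighters (if i = "up" then 0 else if i = "down" then 1 else st.2.1)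
                      (st.1 + (if i = "right" then 1 else if i = "left" then -1 else 0))]))
      (x, y, cs)).2.2
    = cs ++ ((pvXsRec x (pvDeltas ms)).zip (pvYsRec y ms)).map (fun p => pvLook fighters p.2 p.1) := by
  induction ms with
  | nil => intro x y cs; simp [pvDeltas, pvXsRec, pvYsRec]
  | cons m ms ih =>
    intro x y cs
    rw [List.foldl_cons, ih]
    simp [pvDeltas, pvXsRec, pvYsRec]

-- ===== VERDICT (by name: the statement is the Claim_ definition above) =====
theorem street_fighter_selection_spec : Claim_equal_street_fighter_selection := by
  intro fighters ip moves _ _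
  unfold Spec_street_fighter_selection street_fighter_selection street_fighter_selection_alt pvXs pvYs
  simp only [pvStep_eq]
  rw [pvXs_eq_rec, pvYs_eq_rec, pvMain]
  simp
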